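-- pv_equiv track=rewrite | github.com/DenisaFB/RF-DETR2Kraken | src/extract_diagrams/extract_figures.py | bbox_from_points
-- ===== SOURCE A (Python) =====
-- def bbox_from_points(points, width, height):
--     """
--     Compute a bbox (left, top, right, bottom) from polygon points.
--     """
--     xs = [p[0] for p in points]
--     ys = [p[1] for p in points]
--     left = max(0, min(xs))
--     top = max(0, min(ys))
--     right = min(width, max(xs))
--     bottom = min(height, max(ys))
--     return left, top, right, bottom
-- ===== SOURCE B (Python) =====
-- def bbox_from_points(points, width, height):
--     """
--     Compute a bbox (left, top, right, bottom) from polygon points.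
--     Sort each coordinate list once; the extremes are then the first and
--     last elements of the sorted lists (no min/max scans at all).
--     """
--     xs = sorted(p[0] for p in points)
--     ys = sorted(p[1] for p in points)
--     return max(0, xs[0]), max(0, ys[0]), min(width, xs[-1]), min(height, ys[-1])
-- ===== Notes on version B (the rewrite author's own statement) =====
-- stated objective: alternative
-- what changed: Instead of four min/max scans over two comprehension lists, B sorts each coordinate sequence once and reads the extremes off the ends of the sorted lists (xs[0]/xs[-1]), then applies the same clamps.
import Mathlib
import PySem

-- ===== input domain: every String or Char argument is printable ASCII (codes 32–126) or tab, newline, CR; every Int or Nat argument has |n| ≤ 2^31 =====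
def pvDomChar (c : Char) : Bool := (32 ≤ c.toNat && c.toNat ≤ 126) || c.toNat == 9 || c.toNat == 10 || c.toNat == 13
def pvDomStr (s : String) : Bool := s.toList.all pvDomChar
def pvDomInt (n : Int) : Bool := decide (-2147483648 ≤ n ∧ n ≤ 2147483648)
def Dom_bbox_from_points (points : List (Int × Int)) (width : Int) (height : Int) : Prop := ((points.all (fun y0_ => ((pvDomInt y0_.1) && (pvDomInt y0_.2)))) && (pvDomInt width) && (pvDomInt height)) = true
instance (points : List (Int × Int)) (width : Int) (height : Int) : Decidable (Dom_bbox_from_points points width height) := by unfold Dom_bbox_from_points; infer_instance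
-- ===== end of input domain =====

-- B replaces A's four min/max scans over two comprehension lists with one sort per coordinate,
-- reading the extremes off the ends of the sorted lists; Pre_ excludes the empty list, on which both Pythons raise.


-- ===== PORT A =====
def bbox_from_points (points : List (Int × Int)) (width : Int) (height : Int) : Int × Int × Int × Int :=
  let xs := points.map (fun p => p.1)
  let ys := points.map (fun p => p.2)
  match PySem.List.min? xs (fun x => x), PySem.List.min? ys (fun y => y),
        PySem.List.max? xs (fun x => x), PySem.List.max? ys (fun y => y) with
  | some mnx, some mny, some mxx, some mxy =>
      (max 0 mnx, max 0 mny, min width mxx, min height mxy)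
  | _, _, _, _ => (0, 0, 0, 0)   -- unreachable under Pre_ (min([]) raises ValueError in Python)

-- ===== PORT B =====
def bbox_from_points_alt (points : List (Int × Int)) (width : Int) (height : Int) : Int × Int × Int × Int :=
  let xs := PySem.List.sorted (points.map (fun p => p.1)) (fun x => x) false
  let ys := PySem.List.sorted (points.map (fun p => p.2)) (fun y => y) false
  match PySem.List.pyGet? xs 0 with
  | none => (0, 0, 0, 0)         -- unreachable under Pre_ (xs[0] raises IndexError in Python)
  | some mnx =>
    match PySem.List.pyGet? ys 0 with
    | none => (0, 0, 0, 0)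
    | some mny =>
      match PySem.List.pyGet? xs (-1) with
      | none => (0, 0, 0, 0)
      | some mxx =>
        match PySem.List.pyGet? ys (-1) with
        | none => (0, 0, 0, 0)
        | some mxy => (max 0 mnx, max 0 mny, min width mxx, min height mxy)

-- ===== PRECONDITION & SPEC =====
-- Pre_ excludes only the empty polygon: A raises ValueError there (min of empty list), B raises IndexError.
def Pre_bbox_from_points (points : List (Int × Int)) (width : Int) (height : Int) : Prop := points ≠ []
instance (points : List (Int × Int)) (width : Int) (height : Int) : Decidable (Pre_bbox_from_points points width height) := by unfold Pre_bbox_from_points; infer_instance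
def pvWitness_bbox_from_points : (List (Int × Int)) × Int × Int := ([(1, 2), (-3, 7)], 10, 5)

def Spec_bbox_from_points (points : List (Int × Int)) (width : Int) (height : Int) (out : Int × Int × Int × Int) : Prop := out = bbox_from_points_alt points width height
instance (points : List (Int × Int)) (width : Int) (height : Int) (out : Int × Int × Int × Int) : Decidable (Spec_bbox_from_points points width height out) := by unfold Spec_bbox_from_points; infer_instance

-- ===== CLAIM =====
def Claim_equal_bbox_from_points : Prop := ∀ (points : List (Int × Int)) (width : Int) (height : Int), Dom_bbox_from_points points width height → Pre_bbox_from_points points width height → Spec_bbox_from_points points width height (bbox_from_points points width height)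

-- ===== LEMMAS AND PROOFS =====

-- The first element of sorted(zs) is the value min(zs) computes.
theorem sorted_head_eq_min (zs : List Int) (h : zs ≠ []) :
    PySem.List.pyGet? (PySem.List.sorted zs (fun x => x) false) 0
      = PySem.List.min? zs (fun x => x) := by
  obtain ⟨m, hm⟩ : ∃ m, PySem.List.min? zs (fun x => x) = some m := by
    rcases Option.eq_none_or_eq_some (PySem.List.min? zs (fun x => x)) with h0 | h0
    · exact absurd ((PySem.List.min?_eq_none_iff _ _).mp h0) h
    · exact h0
  rcases hs : PySem.List.sorted zs (fun x => x) false with _ | ⟨a, t⟩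
  · exact absurd ((PySem.List.sorted_eq_nil_iff _ _ _).mp hs) h
  · rw [PySem.List.pyGet?_zero_cons, hm, Option.some.injEq]
    have ham : a ≤ m := by
      have := PySem.List.key_head_sorted_le (xs := zs) (key := fun x => x) hs
      exact this m (PySem.List.min?_mem hm)
    have hma : m ≤ a := by
      have ha : a ∈ zs := by
        have : a ∈ PySem.List.sorted zs (fun x => x) false := by rw [hs]; exact List.mem_cons_self
        exact (PySem.List.mem_sorted _ _ _ _).mp this
      exact PySem.List.min?_isMin hm a ha
    omega

-- In a ≤-sorted list the last element dominates every member.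
theorem pairwise_le_getLast (l : List Int) (hp : l.Pairwise (fun a b => a ≤ b)) (hl : l ≠ [])
    (y : Int) (hy : y ∈ l) : y ≤ l.getLast hl := by
  induction l with
  | nil => exact absurd rfl hl
  | cons a t ih =>
      rcases List.pairwise_cons.mp hp with ⟨hall, hpt⟩
      by_cases ht : t = []
      · subst ht
        simp only [List.mem_singleton] at hy
        simp [hy, List.getLast]
      · rw [List.getLast_cons ht]
        rcases List.mem_cons.mp hy with rfl | hyt
        · exact hall _ (List.getLast_mem ht)
        · exact ih hpt ht hyt

-- The last element of sorted(zs) is the value max(zs) computes.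
theorem sorted_last_eq_max (zs : List Int) (h : zs ≠ []) :
    PySem.List.pyGet? (PySem.List.sorted zs (fun x => x) false) (-1)
      = PySem.List.max? zs (fun x => x) := by
  obtain ⟨m, hm⟩ : ∃ m, PySem.List.max? zs (fun x => x) = some m := by
    rcases Option.eq_none_or_eq_some (PySem.List.max? zs (fun x => x)) with h0 | h0
    · exact absurd ((PySem.List.max?_eq_none_iff _ _).mp h0) h
    · exact h0
  have hns : PySem.List.sorted zs (fun x => x) false ≠ [] := by
    intro h0; exact h ((PySem.List.sorted_eq_nil_iff _ _ _).mp h0)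
  rw [PySem.List.pyGet?_neg_one, List.getLast?_eq_some_getLast hns, hm, Option.some.injEq]
  have hlmem : (PySem.List.sorted zs (fun x => x) false).getLast hns ∈ zs :=
    (PySem.List.mem_sorted _ _ _ _).mp (List.getLast_mem hns)
  have h1 : (PySem.List.sorted zs (fun x => x) false).getLast hns ≤ m :=
    PySem.List.max?_isMax hm _ hlmem
  have h2 : m ≤ (PySem.List.sorted zs (fun x => x) false).getLast hns := by
    have hp : (PySem.List.sorted zs (fun x => x) false).Pairwise (fun a b => a ≤ b) :=
      PySem.List.sorted_pairwise zs (fun x => x)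
    exact pairwise_le_getLast _ hp hns m ((PySem.List.mem_sorted _ _ _ _).mpr (PySem.List.max?_mem hm))
  omega

theorem bbox_spec_aux (points : List (Int × Int)) (width height : Int) (h : points ≠ []) :
    bbox_from_points points width height = bbox_from_points_alt points width height := by
  have hx : points.map (fun p => p.1) ≠ [] := by simpa using h
  have hy : points.map (fun p => p.2) ≠ [] := by simpa using h
  obtain ⟨mnx, hmnx⟩ : ∃ m, PySem.List.min? (points.map (fun p => p.1)) (fun x => x) = some m := by
    rcases Option.eq_none_or_eq_some (PySem.List.min? (points.map (fun p => p.1)) (fun x => x)) with h0 | h0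
    · exact absurd ((PySem.List.min?_eq_none_iff _ _).mp h0) hx
    · exact h0
  obtain ⟨mny, hmny⟩ : ∃ m, PySem.List.min? (points.map (fun p => p.2)) (fun y => y) = some m := by
    rcases Option.eq_none_or_eq_some (PySem.List.min? (points.map (fun p => p.2)) (fun y => y)) with h0 | h0
    · exact absurd ((PySem.List.min?_eq_none_iff _ _).mp h0) hy
    · exact h0
  obtain ⟨mxx, hmxx⟩ : ∃ m, PySem.List.max? (points.map (fun p => p.1)) (fun x => x) = some m := by
    rcases Option.eq_none_or_eq_some (PySem.List.max? (points.map (fun p => p.1)) (fun x => x)) with h0 | h0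
    · exact absurd ((PySem.List.max?_eq_none_iff _ _).mp h0) hx
    · exact h0
  obtain ⟨mxy, hmxy⟩ : ∃ m, PySem.List.max? (points.map (fun p => p.2)) (fun y => y) = some m := by
    rcases Option.eq_none_or_eq_some (PySem.List.max? (points.map (fun p => p.2)) (fun y => y)) with h0 | h0
    · exact absurd ((PySem.List.max?_eq_none_iff _ _).mp h0) hy
    · exact h0
  simp only [bbox_from_points, bbox_from_points_alt,
    sorted_head_eq_min _ hx, sorted_head_eq_min _ hy,
    sorted_last_eq_max _ hx, sorted_last_eq_max _ hy,
    hmnx, hmny, hmxx, hmxy]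

-- ===== VERDICT =====
theorem bbox_from_points_spec : Claim_equal_bbox_from_points := by
  intro points width height _ hpre
  exact bbox_spec_aux points width height hpre
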